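-- pv_equiv track=rewrite | github.com/amitt001/nql | languageprocess/sqlizer.py | insert_token
-- ===== SOURCE A (Python) =====
-- def insert_token(qinput):
--     '''
--     for proper formatting of the insert queries i.e. quotes and commas
--     '''
--     attr = []
--     val = []
--     newdata = []
--     data = qinput
--     length = len(data) - 1 #index starts with 0
--     for index,word in enumerate(data):
--         if word == '=': #and index+1 != length: # last check to correct last ','
--             attr.append(data[index-1])
-- #            val.append(data[index+1])
--
--             i, lnth = index+2, len(data)
--             stri = ''
--             # for multiple word insert statements
--             while i < lnth and (data[i]) != '=':
--                 stri += data[i - 1] + ' '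
--                 i += 1
--             #this if for one word value of last column
--             if i == lnth:
--                 stri += data[i-1]
--             val.append(stri)
--     # to remove spaces
--     attr = tuple([i.strip() for i in attr])
--     val = tuple([j.strip() for j in val])
--     newdata = [data[0]]
--     newdata.append(str(attr))
--     newdata.append('VALUES')
--     newdata.append(str(val))
--     return newdata
-- ===== SOURCE B (Python) =====
-- def insert_token(qinput):
--     '''
--     for proper formatting of the insert queries i.e. quotes and commas
--     '''
--     data = qinput
--     n = len(data)
--     eq = [i for i, w in enumerate(data) if w == '=']
--     attr = tuple(data[e - 1].strip() for e in eq)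
--     vals = []
--     for e in eq:
--         nxt = next((f for f in eq if f >= e + 2), None)
--         stop = n if nxt is None else nxt - 1
--         vals.append(' '.join(data[e + 1:stop]).strip())
--     val = tuple(vals)
--     return [data[0], str(attr), 'VALUES', str(val)]
-- ===== Notes on version B (the rewrite author's own statement) =====
-- stated objective: simpler
-- what changed: Replaces A's interleaved scan (an enumerate loop with a nested while re-scanning forward for the next '=' and hand-concatenating words with trailing spaces) by a build-index-then-map decomposition: first collect the list of '='-positions once, then derive each attribute and each value directly as a slice data[e+1:stop] joined with ' '.join, where stop comes from the index table.
import Mathlib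
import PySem

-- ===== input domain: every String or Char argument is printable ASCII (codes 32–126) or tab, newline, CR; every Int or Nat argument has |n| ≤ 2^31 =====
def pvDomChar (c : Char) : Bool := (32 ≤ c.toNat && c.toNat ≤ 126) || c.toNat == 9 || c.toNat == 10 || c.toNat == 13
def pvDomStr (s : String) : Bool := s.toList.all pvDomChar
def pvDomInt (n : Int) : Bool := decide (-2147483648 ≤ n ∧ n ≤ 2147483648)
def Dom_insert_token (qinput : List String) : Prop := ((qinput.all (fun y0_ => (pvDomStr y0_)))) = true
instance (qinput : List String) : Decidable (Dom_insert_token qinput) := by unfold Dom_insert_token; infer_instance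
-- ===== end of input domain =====

-- B rebuilds the result from an index table of '='-positions plus slice/join, instead of A's
-- interleaved scan with a nested while; objective: simpler decomposition (same return value).

-- Python's repr(s) for a str of printable ASCII / tab / newline / CR (shared formatting helper:
-- both Pythons call str(tuple_of_str); exact on Dom's character set)
def pyReprS (cs : List Char) : List Char :=
  let dq : Bool := cs.contains '\'' && !(cs.contains '"')
  let q : Char := if dq then '"' else '\''
  q :: (cs.flatMap (fun c =>
    if c = '\\' then ['\\', '\\']
    else if c = q then ['\\', q]
    else if c = '\t' then ['\\', 't']
    else if c = '\n' then ['\\', 'n']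
    else if c = '\r' then ['\\', 'r']
    else [c]) ++ [q])

-- Python's str(t) for a tuple of str
def pyTupleStr (xs : List (List Char)) : String :=
  String.ofList (match xs with
  | [] => ['(', ')']
  | [x] => '(' :: (pyReprS x ++ [',', ')'])
  | _ => '(' :: (PySem.Chars.join [',', ' '] (xs.map pyReprS) ++ [')']))

-- ===== PORT A =====
-- the inner 'while i < lnth and data[i] != "=" : stri += data[i-1] + " " ; i += 1' plus the
-- trailing 'if i == lnth: stri += data[i-1]' (string built as List Char; data[i] is in range
-- whenever read, so getD is exact)
def insertInnerA (data : List String) (stri : List Char) (i : Nat) : List Char :=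
  if i < data.length then
    if data.getD i "" ≠ "=" then
      insertInnerA data (stri ++ (data.getD (i - 1) "").toList ++ [' ']) (i + 1)
    else stri
  else if i = data.length then stri ++ (data.getD (i - 1) "").toList else stri
termination_by data.length - i

-- the outer 'for index, word in enumerate(data): if word == "=": attr.append(data[index-1]); … val.append(stri)'
def insertScanA (data : List String) : List String × List (List Char) :=
  (PySem.List.enumerate data).foldl
    (fun acc iw =>
      if iw.2 = "=" then
        (acc.1 ++ [PySem.List.pyGetD data (iw.1 - 1) ""],
         acc.2 ++ [insertInnerA data [] (iw.1 + 2).toNat])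
      else acc)
    ([], [])

def insert_token (qinput : List String) : List String :=
  let data := qinput
  let st := insertScanA data
  let attr := st.1.map (fun s => PySem.Chars.strip s.toList)
  let val := st.2.map (fun cs => PySem.Chars.strip cs)
  [PySem.List.pyGetD data 0 "", pyTupleStr attr, "VALUES", pyTupleStr val]

-- ===== PORT B =====
def insert_token_alt (qinput : List String) : List String :=
  let data := qinput
  let n := data.length
  let eq := (PySem.List.enumerate data).filterMap
    (fun iw => if iw.2 = "=" then some iw.1 else none)
  let attr := eq.map (fun e => PySem.Chars.strip (PySem.List.pyGetD data (e - 1) "").toList)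
  let vals := eq.map (fun e =>
    let stop : Int := match eq.find? (fun f => e + 2 ≤ f) with
      | some f => f - 1
      | none => (n : Int)
    PySem.Chars.strip (PySem.Chars.join [' ']
      ((PySem.List.slice data (some (e + 1)) (some stop)).map String.toList)))
  [PySem.List.pyGetD data 0 "", pyTupleStr attr, "VALUES", pyTupleStr vals]

-- ===== PRECONDITION & SPEC =====
-- Pre_ excludes only the empty list, on which Python A raises IndexError at data[0]
def Pre_insert_token (qinput : List String) : Prop := qinput ≠ []
instance (qinput : List String) : Decidable (Pre_insert_token qinput) := by unfold Pre_insert_token; infer_instance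
def pvWitness_insert_token : List String := ["insert", "a", "=", "1"]

def Spec_insert_token (qinput : List String) (out : List String) : Prop := out = insert_token_alt qinput
instance (qinput : List String) (out : List String) : Decidable (Spec_insert_token qinput out) := by unfold Spec_insert_token; infer_instance

-- ===== CLAIM (what is proved, stated in full; the proofs are below) =====
def Claim_equal_insert_token : Prop := ∀ (qinput : List String), Dom_insert_token qinput → Pre_insert_token qinput → Spec_insert_token qinput (insert_token qinput)

-- ===== LEMMAS AND PROOFS =====

-- first index ≥ i holding "=" (proof-only: where A's inner while stops)
def firstEq (data : List String) (i : Nat) : Option Nat :=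
  if i < data.length then
    if data.getD i "" = "=" then some i else firstEq data (i + 1)
  else none
termination_by data.length - i

-- the word segment data[i-1 .. m-2], each word with its trailing space, as A's while builds it
def seg (data : List String) (i m : Nat) : List Char :=
  ((data.drop (i - 1)).take (m - i)).flatMap (fun w => w.toList ++ [' '])

theorem filterMap_if_eq_map_filter {a b : Type} (f : a → b) (p : a → Prop) [DecidablePred p]
    (l : List a) :
    l.filterMap (fun x => if p x then some (f x) else none)
      = (l.filter (fun x => decide (p x))).map f := by
  induction l with
  | nil => rfl
  | cons x t ih => by_cases h : p x <;> simp [h, ih]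

theorem find?_congr_mem {a : Type} (p q : a → Bool) (l : List a)
    (h : ∀ x ∈ l, p x = q x) : l.find? p = l.find? q := by
  induction l with
  | nil => rfl
  | cons x t ih =>
    have hx := h x (by simp)
    by_cases hp : p x = true
    · rw [List.find?_cons_of_pos hp, List.find?_cons_of_pos (hx ▸ hp)]
    · rw [List.find?_cons_of_neg (by simpa using hp),
        List.find?_cons_of_neg (by simp [← hx]; simpa using hp)]
      exact ih (fun y hy => h y (by simp [hy]))

theorem firstEq_le (data : List String) :
    ∀ k i m, data.length - i ≤ k → firstEq data i = some m → i ≤ m := by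
  intro k
  induction k with
  | zero =>
    intro i m hk h
    rw [firstEq] at h
    split at h
    · split at h
      · simp only [Option.some.injEq] at h; omega
      · omega
    · exact absurd h (by simp)
  | succ k ih =>
    intro i m hk h
    rw [firstEq] at h
    split at h
    · split at h
      · simp only [Option.some.injEq] at h; omega
      · have := ih (i + 1) m (by omega) h
        omega
    · exact absurd h (by simp)

theorem inner_acc (data : List String) :
    ∀ k i s, data.length - i ≤ k →
      insertInnerA data s i = s ++ insertInnerA data [] i := by
  intro k
  induction k with
  | zero =>
    intro i s hk
    rw [insertInnerA, if_neg (by omega : ¬ i < data.length)]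
    conv_rhs => rw [insertInnerA, if_neg (by omega : ¬ i < data.length)]
    by_cases h2 : i = data.length
    · rw [if_pos h2, if_pos h2]
      simp
    · rw [if_neg h2, if_neg h2]
      simp
  | succ k ih =>
    intro i s hk
    by_cases h1 : i < data.length
    · by_cases h2 : data.getD i "" ≠ "="
      · rw [insertInnerA, if_pos h1, if_pos h2]
        conv_rhs => rw [insertInnerA, if_pos h1, if_pos h2]
        rw [ih (i + 1) _ (by omega), ih (i + 1) (([] : List Char) ++ (data.getD (i - 1) "").toList ++ [' ']) (by omega)]
        simp
      · rw [insertInnerA, if_pos h1, if_neg h2]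
        conv_rhs => rw [insertInnerA, if_pos h1, if_neg h2]
        simp
    · by_cases h2 : i = data.length
      · rw [insertInnerA, if_neg h1, if_pos h2]
        conv_rhs => rw [insertInnerA, if_neg h1, if_pos h2]
        simp
      · rw [insertInnerA, if_neg h1, if_neg h2]
        conv_rhs => rw [insertInnerA, if_neg h1, if_neg h2]
        simp

theorem seg_nil (data : List String) (i : Nat) : seg data i i = [] := by
  unfold seg
  simp

theorem seg_cons (data : List String) (i m : Nat) (h1 : 1 ≤ i) (h2 : i < data.length)
    (h3 : i + 1 ≤ m) :
    seg data i m = (data.getD (i - 1) "").toList ++ [' '] ++ seg data (i + 1) m := by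
  unfold seg
  have hd : data.drop (i - 1) = data[i - 1] :: data.drop i := by
    rw [List.drop_eq_getElem_cons (by omega)]
    congr 2
    omega
  have hm : m - i = (m - (i + 1)) + 1 := by omega
  rw [hd, hm, List.take_succ_cons, List.flatMap_cons,
    List.getD_eq_getElem data "" (by omega : i - 1 < data.length)]
  simp

theorem inner_char (data : List String) :
    ∀ k i, 1 ≤ i → data.length - i ≤ k →
      insertInnerA data [] i =
        (match firstEq data i with
         | some m => seg data i m
         | none =>
             if i ≤ data.length then
               seg data i data.length ++ (data.getD (data.length - 1) "").toList
             else []) := by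
  intro k
  induction k with
  | zero =>
    intro i h1 hk
    have hn : ¬ i < data.length := by omega
    have hfe : firstEq data i = none := by rw [firstEq, if_neg hn]
    rw [insertInnerA, if_neg hn, hfe]
    have hred : (match (none : Option Nat) with
        | some m => seg data i m
        | none => if i ≤ data.length then
            seg data i data.length ++ (data.getD (data.length - 1) "").toList
          else []) = if i ≤ data.length then
            seg data i data.length ++ (data.getD (data.length - 1) "").toList
          else [] := rfl
    rw [hred]
    by_cases h2 : i = data.length
    · rw [if_pos h2, if_pos (by omega), h2, seg_nil]
    · rw [if_neg h2, if_neg (by omega)]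
  | succ k ih =>
    intro i h1 hk
    by_cases hlt : i < data.length
    · by_cases h2 : data.getD i "" = "="
      · have hfe : firstEq data i = some i := by rw [firstEq, if_pos hlt, if_pos h2]
        rw [insertInnerA, if_pos hlt, if_neg (by simpa using h2), hfe]
        have hred : (match (some i : Option Nat) with
            | some m => seg data i m
            | none => if i ≤ data.length then
                seg data i data.length ++ (data.getD (data.length - 1) "").toList
              else []) = seg data i i := rfl
        rw [hred, seg_nil]
      · have hfe : firstEq data i = firstEq data (i + 1) := by
          rw [firstEq, if_pos hlt, if_neg h2]
        rw [insertInnerA, if_pos hlt, if_pos (by simpa using h2),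
          inner_acc data (data.length) (i + 1) _ (by omega),
          ih (i + 1) (by omega) (by omega), hfe]
        cases hfe2 : firstEq data (i + 1) with
        | some m =>
          have hm : i + 1 ≤ m := firstEq_le data (data.length) (i + 1) m (by omega) hfe2
          have hred : ∀ j : Nat, (match (some m : Option Nat) with
              | some m => seg data j m
              | none => if j ≤ data.length then
                  seg data j data.length ++ (data.getD (data.length - 1) "").toList
                else []) = seg data j m := fun _ => rfl
          rw [hred, hred, seg_cons data i m h1 hlt hm]
          simp
        | none =>
          have hred : ∀ j : Nat, (match (none : Option Nat) with
              | some m => seg data j m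
              | none => if j ≤ data.length then
                  seg data j data.length ++ (data.getD (data.length - 1) "").toList
                else []) = if j ≤ data.length then
                  seg data j data.length ++ (data.getD (data.length - 1) "").toList
                else [] := fun _ => rfl
          rw [hred, hred, if_pos (by omega), if_pos (by omega),
            seg_cons data i data.length h1 hlt (by omega)]
          simp
    · have hfe : firstEq data i = none := by rw [firstEq, if_neg hlt]
      rw [insertInnerA, if_neg hlt, hfe]
      have hred : (match (none : Option Nat) with
          | some m => seg data i m
          | none => if i ≤ data.length then
              seg data i data.length ++ (data.getD (data.length - 1) "").toList
            else []) = if i ≤ data.length then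
              seg data i data.length ++ (data.getD (data.length - 1) "").toList
            else [] := rfl
      rw [hred]
      by_cases h2 : i = data.length
      · rw [if_pos h2, if_pos (by omega), h2, seg_nil]
      · rw [if_neg h2, if_neg (by omega)]

-- the '='-index table as a list of Nats
def eqN (data : List String) : List Nat :=
  (List.range data.length).filter (fun j => decide (data.getD j "" = "="))

theorem mem_eqN (data : List String) (m : Nat) (h : m ∈ eqN data) :
    m < data.length ∧ data.getD m "" = "=" := by
  unfold eqN at h
  simp only [List.mem_filter, List.mem_range, decide_eq_true_eq] at h
  exact h

theorem eqN_find? (data : List String) :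
    ∀ k i, data.length - i ≤ k →
      (eqN data).find? (fun m => decide (i ≤ m)) = firstEq data i := by
  intro k
  induction k with
  | zero =>
    intro i hk
    rw [firstEq, if_neg (by omega : ¬ i < data.length), List.find?_eq_none]
    intro x hx
    have := mem_eqN data x hx
    simp only [decide_eq_true_eq]
    omega
  | succ k ih =>
    intro i hk
    by_cases hlt : i < data.length
    · by_cases h2 : data.getD i "" = "="
      · have hsum : data.length = i + (data.length - i - 1 + 1) := by omega
        have hsplit : eqN data = (List.range i).filter (fun j => decide (data.getD j "" = "="))
            ++ i :: ((List.range (data.length - i - 1)).map ((fun x => i + x) ∘ Nat.succ)).filter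
              (fun j => decide (data.getD j "" = "=")) := by
          unfold eqN
          conv_lhs => rw [hsum]
          rw [List.range_add, List.filter_append, List.range_succ_eq_map,
            List.map_cons, List.filter_cons]
          have h2' : data[i]?.getD "" = "=" := by simpa using h2
          simp [h2']
        rw [firstEq, if_pos hlt, if_pos h2, List.find?_eq_some_iff_append]
        refine ⟨by simp, _, _, hsplit, ?_⟩
        · intro a ha
          have : a < i := by
            have := List.mem_range.mp (List.mem_filter.mp ha).1
            omega
          simp only [Bool.not_eq_eq_eq_not, Bool.not_true, decide_eq_false_iff_not]
          omega
      · rw [firstEq, if_pos hlt, if_neg h2, ← ih (i + 1) (by omega)]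
        apply find?_congr_mem
        intro x hx
        have hmem := mem_eqN data x hx
        have : x ≠ i := fun h => h2 (h ▸ hmem.2)
        simp only [decide_eq_decide]
        omega
    · rw [firstEq, if_neg hlt, List.find?_eq_none]
      intro x hx
      have := mem_eqN data x hx
      simp only [decide_eq_true_eq]
      omega

theorem eq_list_eq (data : List String) :
    (PySem.List.enumerate data).filterMap
        (fun iw => if iw.2 = "=" then some iw.1 else none)
      = (eqN data).map (fun k : Nat => (k : Int)) := by
  rw [PySem.List.enumerate_eq_map_pyRange data ""]
  simp only [PySem.List.len_eq]
  rw [PySem.List.pyRange_zero_nat, List.map_map, List.filterMap_map]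
  unfold eqN
  have h1 : ∀ x ∈ List.range data.length,
      ((fun iw : Int × String => if iw.2 = "=" then some iw.1 else none) ∘
        (fun j => (j, PySem.List.pyGetD data j "")) ∘ fun k : Nat => (k : Int)) x
      = (fun k : Nat => if data.getD k "" = "=" then some ((k : Int)) else none) x := by
    intro x _
    simp [Function.comp]
  rw [List.filterMap_congr h1, filterMap_if_eq_map_filter (fun k : Nat => ((k : Int)))
    (fun k : Nat => data.getD k "" = "=")]

theorem filterE_eq (data : List String) :
    (PySem.List.enumerate data).filter (fun iw => decide (iw.2 = "="))
      = (eqN data).map (fun (k : Nat) => ((k : Int), data.getD k "")) := by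
  rw [PySem.List.enumerate_eq_map_pyRange data ""]
  simp only [PySem.List.len_eq]
  rw [PySem.List.pyRange_zero_nat, List.map_map, List.filter_map]
  unfold eqN
  rw [List.filter_congr (q := fun j : Nat => decide (data.getD j "" = "="))
    (fun x _ => by simp [Function.comp])]
  apply List.map_congr_left
  intro x _
  simp [Function.comp]

theorem scanA_eq (data : List String) :
    insertScanA data =
      (((PySem.List.enumerate data).filter (fun iw => decide (iw.2 = "="))).map
          (fun iw => PySem.List.pyGetD data (iw.1 - 1) ""),
       ((PySem.List.enumerate data).filter (fun iw => decide (iw.2 = "="))).map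
          (fun iw => insertInnerA data [] (iw.1 + 2).toNat)) := by
  unfold insertScanA
  rw [PySem.List.foldl_ite_eq_foldl_filter (p := fun iw : Int × String => iw.2 = "=")
      (f := fun (acc : List String × List (List Char)) iw =>
        (acc.1 ++ [PySem.List.pyGetD data (iw.1 - 1) ""],
         acc.2 ++ [insertInnerA data [] (iw.1 + 2).toNat]))]
  rw [PySem.List.foldl_prod_mk
      (f := fun acc (iw : Int × String) => acc ++ [PySem.List.pyGetD data (iw.1 - 1) ""])
      (g := fun acc (iw : Int × String) => acc ++ [insertInnerA data [] (iw.1 + 2).toNat])]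
  rw [PySem.List.foldl_append_singleton_eq_map, PySem.List.foldl_append_singleton_eq_map]
  simp

theorem join_append_singleton (l : List (List Char)) (w : List Char) :
    PySem.Chars.join [' '] (l ++ [w]) = l.flatMap (fun x => x ++ [' ']) ++ w := by
  induction l with
  | nil => simp [PySem.Chars.join_singleton]
  | cons x t ih =>
    cases h : t ++ [w] with
    | nil => exact absurd h (by simp)
    | cons b tb =>
      rw [List.cons_append, h, PySem.Chars.join_cons_cons, ← h, ih]
      simp

theorem flatMap_eq_join_space (l : List (List Char)) (h : l ≠ []) :
    l.flatMap (fun x => x ++ [' ']) = PySem.Chars.join [' '] l ++ [' '] := by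
  induction l with
  | nil => exact absurd rfl h
  | cons x t ih =>
    cases t with
    | nil => simp [PySem.Chars.join_singleton]
    | cons b tb =>
      rw [List.flatMap_cons, ih (by simp), PySem.Chars.join_cons_cons]
      simp

theorem rstrip_append_space (x : List Char) :
    PySem.Chars.rstrip (x ++ [' ']) = PySem.Chars.rstrip x := by
  simp [PySem.Chars.rstrip, PySem.Chars.isspace]

theorem strip_append_space (x : List Char) :
    PySem.Chars.strip (x ++ [' ']) = PySem.Chars.strip x := by
  simp only [PySem.Chars.strip, PySem.Chars.lstrip, List.dropWhile_append]
  split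
  · rename_i hemp
    simp only [List.isEmpty_iff] at hemp
    rw [hemp]
    simp [PySem.Chars.isspace, PySem.Chars.rstrip]
  · exact rstrip_append_space _

-- the per-'=' value strings of A and of B agree (after strip)
theorem val_eq (data : List String) (e : Nat) (he : e < data.length) :
    PySem.Chars.strip (insertInnerA data [] (e + 2)) =
      PySem.Chars.strip (PySem.Chars.join [' ']
        ((PySem.List.slice data (some ((e : Int) + 1))
            (some (match ((eqN data).map (fun k : Nat => (k : Int))).find?
                      (fun f => (e : Int) + 2 ≤ f) with
                   | some f => f - 1
                   | none => (data.length : Int)))).map String.toList)) := by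
  have hfind : ((eqN data).map (fun k : Nat => (k : Int))).find? (fun f => (e : Int) + 2 ≤ f)
      = (firstEq data (e + 2)).map (fun k : Nat => (k : Int)) := by
    rw [List.find?_map,
      find?_congr_mem ((fun f : Int => decide ((e : Int) + 2 ≤ f)) ∘ (fun k : Nat => (k : Int)))
        (fun m : Nat => decide (e + 2 ≤ m)) (eqN data)
        (fun x _ => by
          simp only [Function.comp]
          exact decide_eq_decide.mpr (by omega)),
      eqN_find? data data.length (e + 2) (by omega)]
  rw [hfind, inner_char data data.length (e + 2) (by omega) (by omega)]
  cases hm : firstEq data (e + 2) with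
  | some m =>
    have hem : e + 2 ≤ m := firstEq_le data data.length (e + 2) m (by omega) hm
    have hr1 : (match (some m : Option Nat) with
        | some m => seg data (e + 2) m
        | none => if e + 2 ≤ data.length then
            seg data (e + 2) data.length ++ (data.getD (data.length - 1) "").toList
          else []) = seg data (e + 2) m := rfl
    have hr2 : (match ((some m : Option Nat).map (fun k : Nat => (k : Int))) with
        | some f => f - 1
        | none => (data.length : Int)) = (m : Int) - 1 := rfl
    rw [hr1, hr2, show ((m : Int) - 1) = ((m - 1 : Nat) : Int) from by omega,
      show ((e : Int) + 1) = ((e + 1 : Nat) : Int) from by omega,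
      PySem.List.slice_natCast]
    unfold seg
    have harith : e + 2 - 1 = e + 1 := by omega
    have harith2 : m - 1 - (e + 1) = m - (e + 2) := by omega
    rw [harith, harith2]
    generalize ((data.drop (e + 1)).take (m - (e + 2))) = ws
    rw [show ws.flatMap (fun w => w.toList ++ [' '])
        = (ws.map String.toList).flatMap (fun x => x ++ [' ']) from by
      rw [List.flatMap_map]]
    cases hcs : ws.map String.toList with
    | nil => simp [PySem.Chars.join_nil]
    | cons c cst =>
      rw [← hcs, flatMap_eq_join_space _ (by rw [hcs]; simp), strip_append_space]
  | none =>
    have hr2 : (match ((none : Option Nat).map (fun k : Nat => (k : Int))) with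
        | some f => f - 1
        | none => (data.length : Int)) = ((data.length : Nat) : Int) := rfl
    have hr1 : (match (none : Option Nat) with
        | some m => seg data (e + 2) m
        | none => if e + 2 ≤ data.length then
            seg data (e + 2) data.length ++ (data.getD (data.length - 1) "").toList
          else []) = if e + 2 ≤ data.length then
            seg data (e + 2) data.length ++ (data.getD (data.length - 1) "").toList
          else [] := rfl
    rw [hr1, hr2, show ((e : Int) + 1) = ((e + 1 : Nat) : Int) from by omega,
      PySem.List.slice_natCast]
    by_cases hle : e + 2 ≤ data.length
    · rw [if_pos hle]
      have hlen : (data.drop (e + 1)).length = data.length - (e + 1) := by simp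
      have htake : (data.drop (e + 1)).take (data.length - (e + 1)) = data.drop (e + 1) := by
        rw [← hlen, List.take_length]
      rw [htake]
      have hdne : data.drop (e + 1) ≠ [] := by
        intro hnil
        have := congrArg List.length hnil
        rw [hlen] at this
        simp at this
        omega
      have hne : (data.drop (e + 1)).map String.toList ≠ [] := by simpa using hdne
      unfold seg
      have harith : e + 2 - 1 = e + 1 := by omega
      rw [harith,
        show (data.drop (e + 1)).take (data.length - (e + 2))
            = (data.drop (e + 1)).take ((data.drop (e + 1)).length - 1) from by
          rw [hlen, show data.length - (e + 1) - 1 = data.length - (e + 2) from by omega],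
        show ((data.drop (e + 1)).take ((data.drop (e + 1)).length - 1)).flatMap (fun w => w.toList ++ [' '])
          = ((data.drop (e + 1)).map String.toList).dropLast.flatMap (fun x => x ++ [' ']) from by
            rw [List.dropLast_eq_take, ← List.map_take, List.flatMap_map, List.length_map]]
      conv_rhs => rw [← List.dropLast_append_getLast hne, join_append_singleton]
      rw [List.getLast_map, List.getLast_drop, List.getLast_eq_getElem,
        List.getD_eq_getElem data "" (by omega)]
    · rw [if_neg hle,
        show data.length - (e + 1) = 0 from by omega, List.take_zero]
      simp [PySem.Chars.join_nil]

theorem insert_token_spec : Claim_equal_insert_token := by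
  intro qinput _ _
  unfold Spec_insert_token insert_token insert_token_alt
  dsimp only
  rw [scanA_eq, eq_list_eq, filterE_eq]
  dsimp only
  congr 1
  congr 1
  · congr 1
    simp only [List.map_map]
    apply List.map_congr_left
    intro k hk
    simp
  congr 1
  congr 1
  · congr 1
    simp only [List.map_map]
    apply List.map_congr_left
    intro k hk
    have hk' : k < qinput.length := (mem_eqN qinput k hk).1
    simp only [Function.comp_def]
    have h2 : (((k : Int), qinput.getD k "").1 + 2).toNat = k + 2 := by simp; omega
    rw [h2]
    exact val_eq qinput k hk'
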